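-- pv_equiv track=rewrite | github.com/minhtu391811/Planning_Optimization | mini_project/submit/research_GA.py | evaluate
-- ===== SOURCE A (Python) =====
-- from collections import defaultdict
--
-- def evaluate(schedule, classes, teachers, periods):
--     score = 0
--     assigned_classes = defaultdict(list)
--     assigned_teachers = defaultdict(list)
--     idxs = []
--
--     for idx in range(len(schedule)):
--         (cls, sub, start, teacher) = schedule[idx]
--         d = periods[sub]
--         # Kiểm tra xung đột lớp học
--         if any(start <= s < start + d or s <= start < s + periods[su] for (su, s) in assigned_classes[cls]):
--             idxs.append(idx)
--             continue
--         # Kiểm tra xung đột giáo viên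
--         if any(start <= s < start + d or s <= start < s + periods[su] for (su, s) in assigned_teachers[teacher]):
--             idxs.append(idx)
--             continue
--
--         assigned_classes[cls].append((sub, start))
--         assigned_teachers[teacher].append((sub, start))
--         score += 1
--     return score, idxs
-- ===== SOURCE B (Python) =====
-- def evaluate(schedule, classes, teachers, periods):
--     # B: one flat list of accepted (class, teacher, start, end) records with the
--     # interval end precomputed; a single merged conflict scan replaces A's two
--     # per-key dicts, and the score is the length of the accepted list.
--     accepted = []
--     idxs = []
--     for idx, (cls, sub, start, teacher) in enumerate(schedule):
--         end = start + periods[sub]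
--         if any((c == cls or t == teacher)
--                and (start <= s < end or s <= start < e)
--                for (c, t, s, e) in accepted):
--             idxs.append(idx)
--         else:
--             accepted.append((cls, teacher, start, end))
--     return len(accepted), idxs
-- ===== Notes on version B (the rewrite author's own statement) =====
-- stated objective: alternative
-- what changed: Replaces A's two defaultdicts of (subject,start) pairs and the two separate per-key conflict scans with one flat list of accepted (class,teacher,start,end) records whose interval ends are precomputed once, a single merged class-or-teacher overlap scan, and the score recovered as the length of the accepted list instead of a running counter.
import Mathlib
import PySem

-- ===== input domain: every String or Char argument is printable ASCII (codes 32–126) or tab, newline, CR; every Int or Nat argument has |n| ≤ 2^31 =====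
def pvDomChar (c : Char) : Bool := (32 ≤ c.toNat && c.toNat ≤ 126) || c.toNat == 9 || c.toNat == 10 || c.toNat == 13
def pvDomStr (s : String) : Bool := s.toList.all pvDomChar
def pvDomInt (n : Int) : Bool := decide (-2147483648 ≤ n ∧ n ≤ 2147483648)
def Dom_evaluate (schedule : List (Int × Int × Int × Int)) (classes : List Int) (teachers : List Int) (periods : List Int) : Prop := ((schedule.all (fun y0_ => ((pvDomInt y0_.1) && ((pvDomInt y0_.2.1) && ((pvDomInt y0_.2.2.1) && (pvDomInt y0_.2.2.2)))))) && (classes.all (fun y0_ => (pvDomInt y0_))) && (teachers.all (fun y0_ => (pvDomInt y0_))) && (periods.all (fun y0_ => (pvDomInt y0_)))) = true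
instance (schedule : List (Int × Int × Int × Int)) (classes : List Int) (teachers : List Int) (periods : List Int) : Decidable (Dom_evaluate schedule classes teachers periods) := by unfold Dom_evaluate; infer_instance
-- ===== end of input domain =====

-- B replaces A's two per-key dicts by one flat accepted list with precomputed
-- interval ends and a single merged conflict scan (objective: alternative).
-- ===== PORT A =====
-- periods[su] (Python indexing, negative wraps); exact on Pre_ (index always valid there)
def pvDur (periods : List Int) (su : Int) : Int := (PySem.List.pyGet? periods su).getD 0

def evalA_conf (periods : List Int) (start d : Int) (lst : List (Int × Int)) : Bool :=
  lst.any (fun p =>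
    decide ((start ≤ p.2 ∧ p.2 < start + d) ∨ (p.2 ≤ start ∧ start < p.2 + pvDur periods p.1)))

def evalA_step (periods : List Int)
    (st : Int × PySem.Dict Int (List (Int × Int)) × PySem.Dict Int (List (Int × Int)) × List Int)
    (it : Int × (Int × Int × Int × Int)) :
    Int × PySem.Dict Int (List (Int × Int)) × PySem.Dict Int (List (Int × Int)) × List Int :=
  let (score, ac, at_, idxs) := st
  let (idx, cls, sub, start, teacher) := it
  let d := pvDur periods sub
  if evalA_conf periods start d (ac.getD cls []) then
    (score, ac, at_, idxs ++ [idx])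
  else if evalA_conf periods start d (at_.getD teacher []) then
    (score, ac, at_, idxs ++ [idx])
  else
    (score + 1,
     ac.insert cls (ac.getD cls [] ++ [(sub, start)]),
     at_.insert teacher (at_.getD teacher [] ++ [(sub, start)]),
     idxs)

def evaluate (schedule : List (Int × Int × Int × Int)) (classes : List Int) (teachers : List Int) (periods : List Int) : Int × List Int :=
  let r := (PySem.List.enumerate schedule).foldl (evalA_step periods)
             (0, PySem.Dict.empty, PySem.Dict.empty, [])
  (r.1, r.2.2.2)

-- ===== PORT B =====
def evalB_step (periods : List Int)
    (st : List (Int × Int × Int × Int) × List Int)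
    (it : Int × (Int × Int × Int × Int)) :
    List (Int × Int × Int × Int) × List Int :=
  let (accepted, idxs) := st
  let (idx, cls, sub, start, teacher) := it
  let e := start + pvDur periods sub
  if accepted.any (fun r =>
      (r.1 == cls || r.2.1 == teacher) &&
      decide ((start ≤ r.2.2.1 ∧ r.2.2.1 < e) ∨ (r.2.2.1 ≤ start ∧ start < r.2.2.2))) then
    (accepted, idxs ++ [idx])
  else
    (accepted ++ [(cls, teacher, start, e)], idxs)

def evaluate_alt (schedule : List (Int × Int × Int × Int)) (classes : List Int) (teachers : List Int) (periods : List Int) : Int × List Int :=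
  let r := (PySem.List.enumerate schedule).foldl (evalB_step periods) ([], [])
  ((r.1.length : Int), r.2)

-- ===== PRECONDITION & SPEC =====
-- Pre_ excludes exactly the inputs on which Python A raises IndexError
-- (some schedule entry's subject is out of range as an index into periods).
def Pre_evaluate (schedule : List (Int × Int × Int × Int)) (classes : List Int) (teachers : List Int) (periods : List Int) : Prop :=
  ∀ x ∈ schedule, (PySem.List.pyGet? periods x.2.1).isSome = true
instance (schedule : List (Int × Int × Int × Int)) (classes : List Int) (teachers : List Int) (periods : List Int) : Decidable (Pre_evaluate schedule classes teachers periods) := by unfold Pre_evaluate; infer_instance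

def pvWitness_evaluate : (List (Int × Int × Int × Int)) × List Int × List Int × List Int :=
  ([(1, 0, 2, 1), (1, 0, 2, 2)], [1], [1, 2], [3])

def Spec_evaluate (schedule : List (Int × Int × Int × Int)) (classes : List Int) (teachers : List Int) (periods : List Int) (out : Int × List Int) : Prop := out = evaluate_alt schedule classes teachers periods
instance (schedule : List (Int × Int × Int × Int)) (classes : List Int) (teachers : List Int) (periods : List Int) (out : Int × List Int) : Decidable (Spec_evaluate schedule classes teachers periods out) := by unfold Spec_evaluate; infer_instance

-- ===== CLAIM (what is proved, stated in full; the proofs are below) =====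
def Claim_equal_evaluate : Prop := ∀ (schedule : List (Int × Int × Int × Int)) (classes : List Int) (teachers : List Int) (periods : List Int), Dom_evaluate schedule classes teachers periods → Pre_evaluate schedule classes teachers periods → Spec_evaluate schedule classes teachers periods (evaluate schedule classes teachers periods)

-- ===== LEMMAS AND PROOFS =====

-- the state invariant tying A's (score, class-dict, teacher-dict, idxs) to B's (accepted, idxs)
def pvInv (periods : List Int)
    (stA : Int × PySem.Dict Int (List (Int × Int)) × PySem.Dict Int (List (Int × Int)) × List Int)
    (stB : List (Int × Int × Int × Int) × List Int) : Prop :=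
  stA.2.2.2 = stB.2 ∧ stA.1 = (stB.1.length : Int) ∧
  (∀ c : Int, (stA.2.1.getD c []).map (fun p => (p.2, p.2 + pvDur periods p.1))
      = (stB.1.filter (fun r => r.1 == c)).map (fun r => (r.2.2.1, r.2.2.2))) ∧
  (∀ t : Int, (stA.2.2.1.getD t []).map (fun p => (p.2, p.2 + pvDur periods p.1))
      = (stB.1.filter (fun r => r.2.1 == t)).map (fun r => (r.2.2.1, r.2.2.2)))

theorem any_filter_or {α : Type} (l : List α) (p q ov : α → Bool) :
    (((l.filter p).any ov) || ((l.filter q).any ov))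
      = l.any (fun x => (p x || q x) && ov x) := by
  induction l with
  | nil => simp
  | cons x l ih =>
    cases hp : p x <;> cases hq : q x <;> cases ho : ov x <;>
      simp [hp, hq, ho, ← ih]

theorem conf_eq (periods : List Int) (start d : Int) (lst : List (Int × Int)) :
    evalA_conf periods start d lst
      = (lst.map (fun p => (p.2, p.2 + pvDur periods p.1))).any
          (fun se => decide ((start ≤ se.1 ∧ se.1 < start + d) ∨ (se.1 ≤ start ∧ start < se.2))) := by
  simp only [evalA_conf, List.any_map, Function.comp_def]

theorem step_inv (periods : List Int)
    (stA : Int × PySem.Dict Int (List (Int × Int)) × PySem.Dict Int (List (Int × Int)) × List Int)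
    (stB : List (Int × Int × Int × Int) × List Int) (it : Int × (Int × Int × Int × Int))
    (h : pvInv periods stA stB) :
    pvInv periods (evalA_step periods stA it) (evalB_step periods stB it) := by
  obtain ⟨score, ac, at_, idxs⟩ := stA
  obtain ⟨accepted, idxsB⟩ := stB
  obtain ⟨idx, cls, sub, start, teacher⟩ := it
  obtain ⟨h1, h2, h3, h4⟩ := h
  simp only [pvInv] at h1 h2 h3 h4
  have hcc : evalA_conf periods start (pvDur periods sub) (ac.getD cls [])
      = (accepted.filter (fun r => r.1 == cls)).any (fun r =>
          decide ((start ≤ r.2.2.1 ∧ r.2.2.1 < start + pvDur periods sub) ∨ (r.2.2.1 ≤ start ∧ start < r.2.2.2))) := by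
    rw [conf_eq, h3 cls, List.any_map]; rfl
  have hct : evalA_conf periods start (pvDur periods sub) (at_.getD teacher [])
      = (accepted.filter (fun r => r.2.1 == teacher)).any (fun r =>
          decide ((start ≤ r.2.2.1 ∧ r.2.2.1 < start + pvDur periods sub) ∨ (r.2.2.1 ≤ start ∧ start < r.2.2.2))) := by
    rw [conf_eq, h4 teacher, List.any_map]; rfl
  have hmerge : (evalA_conf periods start (pvDur periods sub) (ac.getD cls [])
        || evalA_conf periods start (pvDur periods sub) (at_.getD teacher []))
      = accepted.any (fun r => (r.1 == cls || r.2.1 == teacher)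
          && decide ((start ≤ r.2.2.1 ∧ r.2.2.1 < start + pvDur periods sub) ∨ (r.2.2.1 ≤ start ∧ start < r.2.2.2))) := by
    rw [hcc, hct, any_filter_or]
  by_cases hb : accepted.any (fun r => (r.1 == cls || r.2.1 == teacher)
      && decide ((start ≤ r.2.2.1 ∧ r.2.2.1 < start + pvDur periods sub) ∨ (r.2.2.1 ≤ start ∧ start < r.2.2.2))) = true
  · -- conflict on both sides: both just append idx
    have hA : (evalA_conf periods start (pvDur periods sub) (ac.getD cls [])
        || evalA_conf periods start (pvDur periods sub) (at_.getD teacher [])) = true := by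
      rw [hmerge]; exact hb
    have hresA : evalA_step periods (score, ac, at_, idxs) (idx, cls, sub, start, teacher)
        = (score, ac, at_, idxs ++ [idx]) := by
      rw [Bool.or_eq_true] at hA
      rcases hA with hA | hA <;> simp [evalA_step, hA]
    have hresB : evalB_step periods (accepted, idxsB) (idx, cls, sub, start, teacher)
        = (accepted, idxsB ++ [idx]) := by
      simp only [evalB_step]
      rw [hb]
      simp
    rw [hresA, hresB]
    exact ⟨by simp [h1], h2, h3, h4⟩
  · -- no conflict on either side: both accept the item
    have hA : (evalA_conf periods start (pvDur periods sub) (ac.getD cls [])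
        || evalA_conf periods start (pvDur periods sub) (at_.getD teacher [])) = false := by
      rw [hmerge]; exact Bool.eq_false_iff.mpr hb
    rw [Bool.or_eq_false_iff] at hA
    have hresA : evalA_step periods (score, ac, at_, idxs) (idx, cls, sub, start, teacher)
        = (score + 1,
           ac.insert cls (ac.getD cls [] ++ [(sub, start)]),
           at_.insert teacher (at_.getD teacher [] ++ [(sub, start)]),
           idxs) := by
      simp [evalA_step, hA.1, hA.2]
    have hresB : evalB_step periods (accepted, idxsB) (idx, cls, sub, start, teacher)
        = (accepted ++ [(cls, teacher, start, start + pvDur periods sub)], idxsB) := by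
      simp only [evalB_step]
      rw [Bool.eq_false_iff.mpr hb]
      simp
    rw [hresA, hresB]
    refine ⟨h1, by simp [h2], ?_, ?_⟩
    · intro c
      rw [PySem.Dict.getD_insert]
      by_cases hc : c = cls
      · subst hc
        simp [List.filter_append, h3 c]
      · simp [List.filter_append, h3 c, hc, Ne.symm hc]
    · intro t
      rw [PySem.Dict.getD_insert]
      by_cases ht : t = teacher
      · subst ht
        simp [List.filter_append, h4 t]
      · simp [List.filter_append, h4 t, ht, Ne.symm ht]

theorem foldl_inv (periods : List Int) (l : List (Int × (Int × Int × Int × Int)))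
    (stA : Int × PySem.Dict Int (List (Int × Int)) × PySem.Dict Int (List (Int × Int)) × List Int)
    (stB : List (Int × Int × Int × Int) × List Int) (h : pvInv periods stA stB) :
    pvInv periods (l.foldl (evalA_step periods) stA) (l.foldl (evalB_step periods) stB) := by
  induction l generalizing stA stB with
  | nil => exact h
  | cons x l ih => exact ih _ _ (step_inv periods stA stB x h)

-- ===== VERDICT (by name: the statement is the Claim_ definition above) =====
theorem evaluate_spec : Claim_equal_evaluate := by
  intro schedule classes teachers periods _ _
  unfold Spec_evaluate evaluate evaluate_alt
  have h0 : pvInv periods (0, PySem.Dict.empty, PySem.Dict.empty, ([] : List Int))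
      (([] : List (Int × Int × Int × Int)), ([] : List Int)) := by
    refine ⟨rfl, rfl, ?_, ?_⟩ <;> intro k <;> simp [PySem.Dict.getD, PySem.Dict.get?, PySem.Dict.empty]
  have h := foldl_inv periods (PySem.List.enumerate schedule) _ _ h0
  obtain ⟨h1, h2, -, -⟩ := h
  exact Prod.ext h2 h1
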